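-- pv_equiv track=rewrite | github.com/ymg5218/CodingTest | 프로그래머스/Lv2/조이스틱.py | movecase_2
-- ===== SOURCE A (Python) =====
-- def movecase_2(arr, incorr_cnt):
--     # 가장끝으로 이동하고 시작하므로 1로 시작
--     cnt = 1
--     # 현재 탐색 인덱스
--     now_idx = 0
--     # 왼쪽으로 이동해볼 때, 가장 가까운 초기 위치 탐색
--     for i in range(len(arr) - 1, -1, -1):
--         if arr[i] != 0:
--             # 찾았다면 now_idx 갱신
--             # 해당 위치는 수정을 해주었음을 표기
--             now_idx = i
--             cnt += i
--             arr[i] = 0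
--             incorr_cnt -= 1
--             break
--
--     cnt += find_minimum(arr, now_idx, incorr_cnt)
--
--     return cnt
--
-- def find_minimum(arr, start_idx, incorr_cnt):
--     length = len(arr)
--     now_idx = start_idx
--
--     cnt = 0
--
--     while incorr_cnt > 0:
--         go_left = now_idx
--         left_cnt = 0
--         # 좌로 이동
--         while True:
--             if arr[go_left] != 0:
--                 break
--             go_left = (go_left - 1 + length) % length
--             left_cnt += 1
--
--         go_right = now_idx
--         right_cnt = 0
--         # 우로 이동
--         while True:
--             if arr[go_right] != 0:
--                 break
--             go_right += 1
--             go_right %= len(arr)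
--             right_cnt += 1
--
--         # 더 움직인 횟수가 적은 방향으로 결정
--         if left_cnt <= right_cnt:
--             now_idx = go_left
--             cnt += left_cnt
--
--         else:
--             now_idx = go_right
--             cnt += right_cnt
--         arr[now_idx] = 0
--
--     return cnt
-- ===== SOURCE B (Python) =====
-- def movecase_2(arr, incorr_cnt):
--     # Return-value equivalence only: A zeroes the last nonzero entry of arr in place, B leaves arr untouched.
--     last = 0
--     for i, v in enumerate(arr):
--         if v != 0:
--             last = i
--     return 1 + last
-- ===== Notes on version B (the rewrite author's own statement) =====
-- stated objective: simpler
-- what changed: A's reverse break-scan plus the whole greedy two-direction cursor simulation (which is dead code on every input where A terminates, since find_minimum never decrements incorr_cnt) is replaced by a single forward pass returning 1 + index of the last nonzero element.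
import Mathlib
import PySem

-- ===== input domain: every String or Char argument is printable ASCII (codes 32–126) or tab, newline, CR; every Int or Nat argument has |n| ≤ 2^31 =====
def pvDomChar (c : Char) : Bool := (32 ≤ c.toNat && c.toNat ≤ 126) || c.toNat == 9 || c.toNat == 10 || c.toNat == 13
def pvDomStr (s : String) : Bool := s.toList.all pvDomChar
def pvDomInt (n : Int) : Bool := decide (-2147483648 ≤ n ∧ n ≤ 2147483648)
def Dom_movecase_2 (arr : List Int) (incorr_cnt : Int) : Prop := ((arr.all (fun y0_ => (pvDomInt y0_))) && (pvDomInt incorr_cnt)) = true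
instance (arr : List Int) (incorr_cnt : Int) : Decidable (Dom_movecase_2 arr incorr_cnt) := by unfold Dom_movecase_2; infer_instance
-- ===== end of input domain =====

-- A terminates only when the count it must still fix is ≤ 0 after its first scan (find_minimum never
-- decrements incorr_cnt); on that domain B returns the same value, 1 + last nonzero index, in one
-- forward pass. Return-value equivalence only: the Python A zeroes the last nonzero entry of arr in place.


-- ===== PORT A =====
-- 'for i in range(len(arr)-1, -1, -1): if arr[i] != 0: … break': index k counts down; returns
-- (arr, now_idx, cnt, incorr_cnt) after the loop.  arr.getD k 0 is exact here: k < len(arr) at every probe.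
def mc2RevScan : Nat → List Int → Int → (List Int × Int × Int × Int)
  | 0, arr, incorr => (arr, 0, 1, incorr)
  | k+1, arr, incorr =>
    if arr.getD k 0 ≠ 0 then
      (arr.set k 0, (k : Int), 1 + (k : Int), incorr - 1)
    else mc2RevScan k arr incorr

-- inner 'while True' of find_minimum, left direction; fuel-limited (the Python loop diverges on an
-- all-zero arr, which lies outside Pre_; within Pre_ this code is never reached)
def fmSearchLeft (arr : List Int) (length : Int) : Nat → Int → Int → Int × Int
  | 0, go, c => (go, c)
  | f+1, go, c =>
    if (PySem.List.pyGet? arr go).getD 0 ≠ 0 then (go, c)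
    else fmSearchLeft arr length f (PySem.Int.mod (go - 1 + length) length) (c + 1)

-- inner 'while True', right direction (go_right += 1; go_right %= len(arr))
def fmSearchRight (arr : List Int) (length : Int) : Nat → Int → Int → Int × Int
  | 0, go, c => (go, c)
  | f+1, go, c =>
    if (PySem.List.pyGet? arr go).getD 0 ≠ 0 then (go, c)
    else fmSearchRight arr length f (PySem.Int.mod (go + 1) length) (c + 1)

-- outer 'while incorr_cnt > 0' of find_minimum; fuel-limited for the same reason (the Python loop
-- never changes incorr_cnt, so whenever its body runs at all the call diverges or raises — outside Pre_)
def fmLoop (length : Int) : Nat → List Int → Int → Int → Int → Int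
  | 0, _, _, cnt, _ => cnt
  | f+1, arr, now, cnt, incorr =>
    if incorr > 0 then
      let l := fmSearchLeft arr length (arr.length + 1) now 0
      let r := fmSearchRight arr length (arr.length + 1) now 0
      if l.2 ≤ r.2 then fmLoop length f (arr.set l.1.toNat 0) l.1 (cnt + l.2) incorr
      else fmLoop length f (arr.set r.1.toNat 0) r.1 (cnt + r.2) incorr
    else cnt

def find_minimum (arr : List Int) (start_idx : Int) (incorr_cnt : Int) : Int :=
  fmLoop (arr.length : Int) (arr.length + 1) arr start_idx 0 incorr_cnt

def movecase_2 (arr : List Int) (incorr_cnt : Int) : Int :=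
  let r := mc2RevScan arr.length arr incorr_cnt
  r.2.2.1 + find_minimum r.1 r.2.1 r.2.2.2

-- ===== PORT B =====
def movecase_2_alt (arr : List Int) (incorr_cnt : Int) : Int :=
  1 + (PySem.List.enumerate arr 0).foldl (fun last iv => if iv.2 ≠ 0 then iv.1 else last) 0

-- ===== PRECONDITION & SPEC =====
-- Pre_ admits exactly the inputs on which the Python A returns: find_minimum never decrements
-- incorr_cnt, so A diverges (or, on [] , raises IndexError) whenever the count left after the first
-- scan is still positive.
def Pre_movecase_2 (arr : List Int) (incorr_cnt : Int) : Prop :=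
  incorr_cnt ≤ 0 ∨ (incorr_cnt = 1 ∧ arr.any (fun x => x != 0) = true)
instance (arr : List Int) (incorr_cnt : Int) : Decidable (Pre_movecase_2 arr incorr_cnt) := by unfold Pre_movecase_2; infer_instance
def pvWitness_movecase_2 : List Int × Int := ([0, 7, 0], 1)

def Spec_movecase_2 (arr : List Int) (incorr_cnt : Int) (out : Int) : Prop := out = movecase_2_alt arr incorr_cnt
instance (arr : List Int) (incorr_cnt : Int) (out : Int) : Decidable (Spec_movecase_2 arr incorr_cnt out) := by unfold Spec_movecase_2; infer_instance

-- ===== CLAIM (what is proved, stated in full; the proofs are below) =====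
def Claim_equal_movecase_2 : Prop := ∀ (arr : List Int) (incorr_cnt : Int), Dom_movecase_2 arr incorr_cnt → Pre_movecase_2 arr incorr_cnt → Spec_movecase_2 arr incorr_cnt (movecase_2 arr incorr_cnt)

-- ===== LEMMAS AND PROOFS =====

-- B's fold, as a function of arr alone
def lastFold (arr : List Int) : Int :=
  (PySem.List.enumerate arr 0).foldl (fun last iv => if iv.2 ≠ 0 then iv.1 else last) 0

theorem lastFold_append (arr : List Int) (x : Int) :
    lastFold (arr ++ [x]) = if x ≠ 0 then (arr.length : Int) else lastFold arr := by
  simp [lastFold, PySem.List.enumerate_append, List.foldl_append, PySem.List.enumerate]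

-- the reverse scan probes only indices < k, so a trailing element is invisible to its
-- cnt/now/incorr components
theorem mc2RevScan_append (x : Int) : ∀ (k : Nat) (arr : List Int) (incorr : Int), k ≤ arr.length →
    ((mc2RevScan k (arr ++ [x]) incorr).2 = (mc2RevScan k arr incorr).2) := by
  intro k
  induction k with
  | zero => intro arr incorr _; simp [mc2RevScan]
  | succ k ih =>
    intro arr incorr hk
    have hlt : k < arr.length := hk
    have hget : (arr ++ [x]).getD k 0 = arr.getD k 0 := by
      simp [List.getD, List.getElem?_append_left hlt]
    simp only [mc2RevScan, hget, ne_eq]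
    split_ifs with h
    · exact ih arr incorr (Nat.le_of_lt hlt)
    · simp

-- characterisation of A's first loop: cnt = 1 + B's fold, and incorr drops by 1 iff a nonzero exists
theorem mc2RevScan_char (arr : List Int) : ∀ (incorr : Int),
    (mc2RevScan arr.length arr incorr).2.2.1 = 1 + lastFold arr ∧
    (mc2RevScan arr.length arr incorr).2.2.2 =
      (if arr.any (fun x => x != 0) then incorr - 1 else incorr) := by
  induction arr using List.reverseRecOn with
  | nil => intro incorr; simp [mc2RevScan, lastFold, PySem.List.enumerate]
  | append_singleton arr x ih =>
    intro incorr
    have hlen : (arr ++ [x]).length = arr.length + 1 := by simp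
    rw [hlen]
    by_cases h : x = 0
    case neg =>
      constructor
      · simp [mc2RevScan, h, lastFold_append]
      · simp [mc2RevScan, h, List.any_append]
    case pos =>
      subst h
      have hproj := mc2RevScan_append (0:Int) arr.length arr incorr (le_refl _)
      have h1 : (mc2RevScan arr.length (arr ++ [(0:Int)]) incorr).2.2.1
          = (mc2RevScan arr.length arr incorr).2.2.1 := by rw [hproj]
      have h2 : (mc2RevScan arr.length (arr ++ [(0:Int)]) incorr).2.2.2
          = (mc2RevScan arr.length arr incorr).2.2.2 := by rw [hproj]
      have hstep : mc2RevScan (arr.length + 1) (arr ++ [(0:Int)]) incorr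
          = mc2RevScan arr.length (arr ++ [(0:Int)]) incorr := by
        simp [mc2RevScan]
      constructor
      · rw [hstep, h1, (ih incorr).1, lastFold_append]; simp
      · rw [hstep, h2, (ih incorr).2, List.any_append]; simp

theorem find_minimum_nonpos (arr : List Int) (now incorr : Int) (h : incorr ≤ 0) :
    find_minimum arr now incorr = 0 := by
  have : ¬ incorr > 0 := by omega
  simp [find_minimum, fmLoop, this]

-- ===== VERDICT (by name: the statement is the Claim_ definition above) =====
theorem movecase_2_spec : Claim_equal_movecase_2 := by
  intro arr incorr _hdom hpre
  unfold Spec_movecase_2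
  have hc := mc2RevScan_char arr incorr
  have hle : (mc2RevScan arr.length arr incorr).2.2.2 ≤ 0 := by
    rw [hc.2]
    rcases hpre with h | ⟨h1, h2⟩
    · split <;> omega
    · simp [h2, h1]
  show (mc2RevScan arr.length arr incorr).2.2.1
      + find_minimum (mc2RevScan arr.length arr incorr).1
          (mc2RevScan arr.length arr incorr).2.1
          (mc2RevScan arr.length arr incorr).2.2.2
      = movecase_2_alt arr incorr
  rw [find_minimum_nonpos _ _ _ hle, hc.1]
  simp [movecase_2_alt, lastFold]
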